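-- pv_equiv track=rewrite | github.com/midnightbot/leetcode_solutions | 1395. Count Number of Teams.py | numTeams
-- ===== SOURCE A (Python) =====
-- from typing import List
--
-- def numTeams(rating: List[int]) -> int:
--     n = len(rating)
--     dp_g, dp_l = [0] * n, [0] * n
--     res = 0
--     for i, r in enumerate(rating):
--         for j in range(i):
--             if r > rating[j]:
--                 dp_g[i] += 1
--                 res += dp_g[j]
--             elif r < rating[j]:
--                 dp_l[i] += 1
--                 res += dp_l[j]
--     return res
-- ===== SOURCE B (Python) =====
-- from typing import List
--
-- def _count_lt(xs, r):
--     return sum(1 for x in xs if x < r)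
--
-- def _count_gt(xs, r):
--     return sum(1 for x in xs if x > r)
--
-- def numTeams(rating: List[int]) -> int:
--     # middle-element counting: each element as the pivot of the triple
--     total = 0
--     left = []
--     rest = list(rating)
--     while rest:
--         r = rest[0]
--         right = rest[1:]
--         total = total + _count_lt(left, r) * _count_gt(right, r) \
--                       + _count_gt(left, r) * _count_lt(right, r)
--         left = left + [r]
--         rest = right
--     return total
-- ===== Notes on version B (the rewrite author's own statement) =====
-- stated objective: alternative
-- what changed: Replaces A's dp_g/dp_l pair-DP (counting triples at their last element via accumulated per-index counters) with per-pivot middle-element counting: for each element, count smaller/greater elements on its left and right and add lessL*greaterR + greaterL*lessR.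
import Mathlib
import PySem

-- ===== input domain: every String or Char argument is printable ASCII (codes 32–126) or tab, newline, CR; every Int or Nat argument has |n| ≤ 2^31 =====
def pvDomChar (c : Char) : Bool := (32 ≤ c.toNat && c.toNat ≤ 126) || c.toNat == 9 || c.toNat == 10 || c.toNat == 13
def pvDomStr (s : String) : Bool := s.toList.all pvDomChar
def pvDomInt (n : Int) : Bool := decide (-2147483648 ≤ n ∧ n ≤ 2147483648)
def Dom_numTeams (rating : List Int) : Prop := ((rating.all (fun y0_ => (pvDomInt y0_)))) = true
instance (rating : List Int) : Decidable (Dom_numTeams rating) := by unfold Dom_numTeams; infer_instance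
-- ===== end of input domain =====

-- B replaces A's pair-DP (dp_g/dp_l accumulated over all pairs) by per-pivot counting of
-- smaller/greater elements on each side; same cost, different decomposition (objective: alternative).

-- ===== PORT A =====
-- inner loop body: state (dp_g[i], dp_l[i], res); t is the stored (rating[j], dp_g[j], dp_l[j])
def innerA (r : Int) (s : Int × Int × Int) (t : Int × Int × Int) : Int × Int × Int :=
  if r > t.1 then (s.1 + 1, s.2.1, s.2.2 + t.2.1)
  else if r < t.1 then (s.1, s.2.1 + 1, s.2.2 + t.2.2)
  else s

-- outer loop body: acc = (list of (rating[j], dp_g[j], dp_l[j]) for processed j, res)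
def stepA (acc : List (Int × Int × Int) × Int) (r : Int) : List (Int × Int × Int) × Int :=
  let t := acc.1.foldl (innerA r) (0, 0, acc.2)
  (acc.1 ++ [(r, t.1, t.2.1)], t.2.2)

def numTeams (rating : List Int) : Int := (rating.foldl stepA ([], 0)).2

-- ===== PORT B =====
def cntLt : List Int → Int → Int
  | [], _ => 0
  | x :: xs, r => (if x < r then 1 else 0) + cntLt xs r

def cntGt : List Int → Int → Int
  | [], _ => 0
  | x :: xs, r => (if x > r then 1 else 0) + cntGt xs r

-- the while loop of Source B: total / left / rest
def goB (total : Int) (left : List Int) : List Int → Int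
  | [] => total
  | r :: right =>
      goB (total + cntLt left r * cntGt right r + cntGt left r * cntLt right r)
        (left ++ [r]) right

def numTeams_alt (rating : List Int) : Int := goB 0 [] rating

-- ===== PRECONDITION & SPEC =====
def Spec_numTeams (rating : List Int) (out : Int) : Prop := out = numTeams_alt rating
instance (rating : List Int) (out : Int) : Decidable (Spec_numTeams rating out) := by unfold Spec_numTeams; infer_instance

-- ===== CLAIM (what is proved, stated in full; the proofs are below) =====
def Claim_equal_numTeams : Prop := ∀ (rating : List Int), Dom_numTeams rating → Spec_numTeams rating (numTeams rating)

-- ===== LEMMAS AND PROOFS =====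

-- the contribution of appending a new last element x after prefix `left ++ p` (per element of p)
def T (left : List Int) (x : Int) : List Int → Int
  | [] => 0
  | r :: rs => (if x > r then cntLt left r else if x < r then cntGt left r else 0) + T (left ++ [r]) x rs

-- A's stored info for the processed prefix p, with elements `left` before it
def info (left : List Int) : List Int → List (Int × Int × Int)
  | [] => []
  | r :: rs => (r, cntLt left r, cntGt left r) :: info (left ++ [r]) rs

-- branch-count / branch-sum specs of A's inner fold
def CLs (r : Int) : List (Int × Int × Int) → Int
  | [] => 0
  | t :: L => (if r > t.1 then 1 else 0) + CLs r L

def CGs (r : Int) : List (Int × Int × Int) → Int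
  | [] => 0
  | t :: L => (if r < t.1 then 1 else 0) + CGs r L

def Ws (r : Int) : List (Int × Int × Int) → Int
  | [] => 0
  | t :: L => (if r > t.1 then t.2.1 else if r < t.1 then t.2.2 else 0) + Ws r L

theorem cntLt_snoc (xs : List Int) (y r : Int) :
    cntLt (xs ++ [y]) r = cntLt xs r + (if y < r then 1 else 0) := by
  induction xs with
  | nil => simp [cntLt]
  | cons a as ih => simp [cntLt, ih]; ring

theorem cntGt_snoc (xs : List Int) (y r : Int) :
    cntGt (xs ++ [y]) r = cntGt xs r + (if y > r then 1 else 0) := by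
  induction xs with
  | nil => simp [cntGt]
  | cons a as ih => simp [cntGt, ih]; ring

theorem inner_eq (r : Int) (L : List (Int × Int × Int)) :
    ∀ g l rs, L.foldl (innerA r) (g, l, rs) = (g + CLs r L, l + CGs r L, rs + Ws r L) := by
  induction L with
  | nil => intro g l rs; simp [CLs, CGs, Ws]
  | cons t L ih =>
      intro g l rs
      simp only [List.foldl_cons, innerA, CLs, CGs, Ws]
      split_ifs with h1 h2 <;> rw [ih] <;>
        refine Prod.ext (by linarith) (Prod.ext (by linarith) (by linarith))

theorem info_snoc (p : List Int) : ∀ left x,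
    info left (p ++ [x]) = info left p ++ [(x, cntLt (left ++ p) x, cntGt (left ++ p) x)] := by
  induction p with
  | nil => intro left x; simp [info]
  | cons r rs ih =>
      intro left x
      simp only [List.cons_append, info, List.cons_append]
      rw [ih]
      simp

theorem Ws_info (p : List Int) : ∀ left x, Ws x (info left p) = T left x p := by
  induction p with
  | nil => intro left x; rfl
  | cons r rs ih => intro left x; simp only [info, Ws, T, ih]

theorem CLs_info (p : List Int) : ∀ left x, CLs x (info left p) = cntLt p x := by
  induction p with
  | nil => intro left x; rfl
  | cons r rs ih =>
      intro left x
      simp only [info, CLs, cntLt, ih]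

theorem CGs_info (p : List Int) : ∀ left x, CGs x (info left p) = cntGt p x := by
  induction p with
  | nil => intro left x; rfl
  | cons r rs ih =>
      intro left x
      simp only [info, CGs, cntGt, ih]

theorem foldA_eq (p : List Int) :
    p.foldl stepA ([], 0) = (info [] p, numTeams p) := by
  have h1 : ∀ q, (q.foldl stepA (([] : List (Int × Int × Int)), (0 : Int))).1 = info [] q := by
    intro q
    induction q using List.reverseRecOn with
    | nil => rfl
    | append_singleton p x ih =>
        rw [List.foldl_append]
        simp only [List.foldl_cons, List.foldl_nil]
        rw [show p.foldl stepA ([], 0) = (info [] p, (p.foldl stepA ([], 0)).2) from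
          Prod.ext ih rfl]
        simp only [stepA, inner_eq]
        rw [info_snoc]
        simp [CLs_info, CGs_info]
  exact Prod.ext (h1 p) rfl

theorem A_snoc (p : List Int) (x : Int) :
    numTeams (p ++ [x]) = numTeams p + T [] x p := by
  unfold numTeams
  rw [List.foldl_append, foldA_eq]
  simp only [List.foldl_cons, List.foldl_nil, stepA, inner_eq]
  rw [show numTeams p = (p.foldl stepA ([],0)).2 from rfl, foldA_eq]
  simp [Ws_info]

theorem goB_add (rest : List Int) : ∀ t c left, goB (t + c) left rest = goB t left rest + c := by
  induction rest with
  | nil => intro t c left; rfl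
  | cons r rs ih =>
      intro t c left
      simp only [goB]
      rw [show t + c + cntLt left r * cntGt rs r + cntGt left r * cntLt rs r
            = (t + cntLt left r * cntGt rs r + cntGt left r * cntLt rs r) + c by ring, ih]

theorem goB_snoc (rest : List Int) : ∀ t left x,
    goB t left (rest ++ [x]) = goB t left rest + T left x rest := by
  induction rest with
  | nil =>
      intro t left x
      simp [goB, cntLt, cntGt, T]
  | cons r rs ih =>
      intro t left x
      simp only [List.cons_append, goB, T]
      rw [ih, cntLt_snoc, cntGt_snoc]
      have hδ : cntLt left r * (if x > r then 1 else 0) + cntGt left r * (if x < r then 1 else 0)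
          = (if x > r then cntLt left r else if x < r then cntGt left r else 0) := by
        split_ifs with h1 h2 <;> linarith
      rw [show t + cntLt left r * (cntGt rs r + (if x > r then 1 else 0))
            + cntGt left r * (cntLt rs r + (if x < r then 1 else 0))
          = (t + cntLt left r * cntGt rs r + cntGt left r * cntLt rs r)
            + (cntLt left r * (if x > r then 1 else 0) + cntGt left r * (if x < r then 1 else 0)) by ring]
      rw [goB_add, hδ]
      ring

theorem main_eq (p : List Int) : numTeams p = numTeams_alt p := by
  induction p using List.reverseRecOn with
  | nil => rfl
  | append_singleton q x ih =>
      rw [A_snoc]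
      unfold numTeams_alt
      rw [goB_snoc, ih]
      rfl

-- ===== VERDICT (by name: the statement is the Claim_ definition above) =====
theorem numTeams_spec : Claim_equal_numTeams := by
  intro rating _
  unfold Spec_numTeams
  exact main_eq rating
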